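-- pv_equiv track=rewrite | github.com/kcaitech/letsencrypt-auto-cert | scripts/cert_manager.py | _get_main_domains
-- ===== SOURCE A (Python) =====
-- def _get_main_domains(domains):
--     """根据域名列表确定主域名"""
--     if not domains:
--         return []
--
--     # 按域名长度排序
--     sorted_domains = sorted(domains, key=len)
--     main_domains = []
--
--     for domain in sorted_domains:
--         for main_domain in main_domains:
--             if domain.endswith('.' + main_domain):
--                 break
--         else:
--             main_domains.append(domain)
--
--     return main_domains
-- ===== SOURCE B (Python) =====
-- def _get_main_domains(domains):
--     """根据域名列表确定主域名"""
--     if not domains: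
--         return []
--
--     accepted = set()
--     result = []
--     for domain in sorted(domains, key=len):
--         # domain is subsumed iff some suffix starting right after a '.' is already accepted
--         if not any(domain[i + 1:] in accepted
--                    for i, ch in enumerate(domain) if ch == '.'):
--             result.append(domain)
--             accepted.add(domain)
--     return result
-- ===== Notes on version B (the rewrite author's own statement) =====
-- stated objective: faster
-- what changed: Instead of testing each domain against every already-accepted domain with endswith (quadratic inner scan), B keeps the accepted domains in a hash set and tests each domain's after-dot suffixes for membership.
import Mathlib
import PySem

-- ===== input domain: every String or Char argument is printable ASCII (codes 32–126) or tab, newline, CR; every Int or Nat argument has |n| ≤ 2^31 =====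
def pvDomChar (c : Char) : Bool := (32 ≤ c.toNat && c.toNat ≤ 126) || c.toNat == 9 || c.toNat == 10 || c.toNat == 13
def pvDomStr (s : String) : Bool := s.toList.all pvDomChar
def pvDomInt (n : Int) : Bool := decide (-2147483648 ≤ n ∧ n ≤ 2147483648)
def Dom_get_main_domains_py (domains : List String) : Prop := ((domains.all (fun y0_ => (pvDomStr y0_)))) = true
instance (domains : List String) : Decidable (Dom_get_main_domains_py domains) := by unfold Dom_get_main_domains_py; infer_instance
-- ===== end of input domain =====

-- B replaces A's inner scan over all accepted domains (endswith against each) by a hash-set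
-- membership test on the current domain's after-dot suffixes; return value only, no mutation.

-- ===== PORT A =====
-- one iteration of A's outer loop; the inner 'for … break / else: append' is the boolean scan
-- 'any m in main_domains with domain.endswith("." + m)' ('.'+m is modelled on the char list: '.' :: m.toList)
def mainStepA (main_domains : List String) (domain : String) : List String :=
  if main_domains.any (fun m => PySem.Chars.endswith domain.toList ('.' :: m.toList))
  then main_domains
  else main_domains ++ [domain]

def get_main_domains_py (domains : List String) : List String :=
  if domains = [] then []
  else (PySem.List.sorted domains (fun d => PySem.Str.len d) false).foldl mainStepA []

-- ===== PORT B =====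
-- the comprehension 'domain[i+1:] for i, ch in enumerate(domain) if ch == "."', ported as the
-- structural recursion over the chars (at the i-th char, domain[i+1:] is exactly the rest)
def dotSuffixes : List Char → List (List Char)
  | [] => []
  | c :: rest => if c = '.' then rest :: dotSuffixes rest else dotSuffixes rest

-- one iteration of B's loop over the state (accepted set of strings as char lists, result)
def mainStepB (st : PySem.Set (List Char) × List String) (domain : String) :
    PySem.Set (List Char) × List String :=
  if (dotSuffixes domain.toList).any (fun s => PySem.Set.contains st.1 s)
  then st
  else (PySem.Set.add st.1 domain.toList, st.2 ++ [domain])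

def get_main_domains_py_alt (domains : List String) : List String :=
  if domains = [] then []
  else ((PySem.List.sorted domains (fun d => PySem.Str.len d) false).foldl mainStepB
          (PySem.Set.empty, [])).2

-- ===== PRECONDITION & SPEC =====
def Spec_get_main_domains_py (domains : List String) (out : List String) : Prop := out = get_main_domains_py_alt domains
instance (domains : List String) (out : List String) : Decidable (Spec_get_main_domains_py domains out) := by unfold Spec_get_main_domains_py; infer_instance

-- ===== CLAIM (what is proved, stated in full; the proofs are below) =====
def Claim_equal_get_main_domains_py : Prop := ∀ (domains : List String), Dom_get_main_domains_py domains → Spec_get_main_domains_py domains (get_main_domains_py domains)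

-- ===== LEMMAS AND PROOFS =====

-- the after-dot suffixes of d are exactly the m with '.'+m a suffix of d
lemma mem_dotSuffixes (d m : List Char) : m ∈ dotSuffixes d ↔ ('.' :: m) <:+ d := by
  induction d with
  | nil => simp [dotSuffixes]
  | cons c rest ih =>
    rw [List.suffix_cons_iff]
    by_cases hc : c = '.' <;>
      simp [dotSuffixes, hc, ih, List.cons.injEq] <;> tauto

-- loop invariant: B's accepted set holds exactly the (char lists of the) accepted domains,
-- and then both folds produce the same accepted list
lemma fold_eq (l : List String) (mains : List String) (acc : PySem.Set (List Char))
    (hmem : ∀ s, PySem.Set.contains acc s = true ↔ s ∈ mains.map String.toList) :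
    (l.foldl mainStepB (acc, mains)).2 = l.foldl mainStepA mains := by
  induction l generalizing mains acc with
  | nil => rfl
  | cons domain l ih =>
    have hcond : ((dotSuffixes domain.toList).any (fun s => PySem.Set.contains acc s))
        = (mains.any (fun m => PySem.Chars.endswith domain.toList ('.' :: m.toList))) := by
      have hiff : ((dotSuffixes domain.toList).any (fun s => PySem.Set.contains acc s)) = true
          ↔ (mains.any (fun m => PySem.Chars.endswith domain.toList ('.' :: m.toList))) = true := by
        simp only [List.any_eq_true, PySem.Chars.endswith_iff, mem_dotSuffixes, hmem,
          List.mem_map]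
        constructor
        · rintro ⟨s, hsuf, m, hm, rfl⟩; exact ⟨m, hm, hsuf⟩
        · rintro ⟨m, hm, hsuf⟩; exact ⟨m.toList, hsuf, m, hm, rfl⟩
      rw [Bool.eq_iff_iff]; exact hiff
    simp only [List.foldl_cons, mainStepA, mainStepB, hcond]
    by_cases h : (mains.any (fun m => PySem.Chars.endswith domain.toList ('.' :: m.toList))) = true
    · simp only [h, if_true]; exact ih mains acc hmem
    · simp only [Bool.not_eq_true] at h
      simp only [h, Bool.false_eq_true, if_false]
      apply ih
      intro s
      rw [PySem.Set.contains_iff, PySem.Set.mem_add, ← PySem.Set.contains_iff, hmem]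
      simp
-- ===== VERDICT (by name: the statement is the Claim_ definition above) =====
theorem get_main_domains_py_spec : Claim_equal_get_main_domains_py := by
  intro domains _
  unfold Spec_get_main_domains_py get_main_domains_py get_main_domains_py_alt
  by_cases h : domains = []
  · simp [h]
  · simp only [h, if_false]
    exact (fold_eq _ [] PySem.Set.empty (by simp [PySem.Set.empty, PySem.Set.contains])).symm
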